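-- pv_equiv track=rewrite | github.com/synthaicode/XRefKit | fm/skillrun.py | _overall_artifact_status
-- ===== SOURCE A (Python) =====
-- ACCEPTED_CLOSE_STATUSES = {"done", "escalated"}
--
-- def _overall_artifact_status(artifacts: list[dict[str, str]]) -> str:
--     if not artifacts:
--         return "pending"
--     if all(artifact["status"] in ACCEPTED_CLOSE_STATUSES for artifact in artifacts):
--         if any(artifact["status"] == "escalated" for artifact in artifacts):
--             return "escalated"
--         return "done"
--     if any(artifact["status"] in {"blocked", "unknown", "escalated"} for artifact in artifacts):
--         return "blocked"
--     return "in_progress"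
-- ===== SOURCE B (Python) =====
-- def _overall_artifact_status(artifacts):
--     if not artifacts:
--         return "pending"
--     esc = open_ = bad = False
--     for artifact in artifacts:
--         s = artifact["status"]
--         if s == "escalated":
--             esc = True
--         elif s != "done":
--             open_ = True
--             if s == "blocked" or s == "unknown":
--                 bad = True
--     if not open_:
--         return "escalated" if esc else "done"
--     return "blocked" if bad or esc else "in_progress"
-- ===== Notes on version B (the rewrite author's own statement) =====
-- stated objective: alternative
-- what changed: B replaces A's three staged all/any list scans with a single pass that accumulates three boolean flags (escalated seen, non-closed seen, blocked/unknown seen) and then decides from the flags in constant time.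
-- outside the precondition, e.g. on _overall_artifact_status([{'status': 'blocked'}, {}]): A returns 'blocked', B raises KeyError
import Mathlib
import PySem

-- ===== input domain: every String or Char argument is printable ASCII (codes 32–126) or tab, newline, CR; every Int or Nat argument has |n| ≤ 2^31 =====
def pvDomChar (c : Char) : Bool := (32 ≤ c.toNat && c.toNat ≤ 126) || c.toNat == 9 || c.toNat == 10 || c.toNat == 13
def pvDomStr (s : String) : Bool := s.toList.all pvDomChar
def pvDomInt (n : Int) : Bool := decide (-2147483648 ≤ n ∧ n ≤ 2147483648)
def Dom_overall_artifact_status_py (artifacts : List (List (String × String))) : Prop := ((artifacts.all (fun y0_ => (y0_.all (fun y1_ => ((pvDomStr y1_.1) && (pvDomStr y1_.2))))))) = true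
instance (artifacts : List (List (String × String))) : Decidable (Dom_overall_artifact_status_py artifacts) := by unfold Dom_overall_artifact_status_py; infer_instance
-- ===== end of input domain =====

-- B replaces A's three staged all/any list scans by one single-pass fold accumulating three
-- boolean flags, then a constant-time decision (alternative decomposition; same asymptotic cost).


-- ===== PORT A =====
-- artifact["status"] (dict lookup; Pre_ guarantees the key is present, so getD's default is never used)
def pvStatus (a : List (String × String)) : String :=
  PySem.Dict.getD (PySem.Dict.mk a) "status" ""

-- A: three staged list scans with all/any generator expressions
def overall_artifact_status_py (artifacts : List (List (String × String))) : String :=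
  if artifacts = [] then "pending"
  else if artifacts.all (fun artifact => pvStatus artifact = "done" || pvStatus artifact = "escalated") then
    if artifacts.any (fun artifact => pvStatus artifact = "escalated") then "escalated" else "done"
  else if artifacts.any (fun artifact =>
      pvStatus artifact = "blocked" || pvStatus artifact = "unknown" || pvStatus artifact = "escalated") then
    "blocked"
  else "in_progress"

-- ===== PORT B =====
-- B: one fold over the list accumulating (esc, open_, bad), then a constant-time decision
def pvStep (acc : Bool × Bool × Bool) (artifact : List (String × String)) : Bool × Bool × Bool :=
  let s := pvStatus artifact
  if s = "escalated" then (true, acc.2.1, acc.2.2)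
  else if s ≠ "done" then (acc.1, true, acc.2.2 || (s = "blocked" || s = "unknown"))
  else acc

def overall_artifact_status_py_alt (artifacts : List (List (String × String))) : String :=
  if artifacts = [] then "pending"
  else
    let st := artifacts.foldl pvStep (false, false, false)
    if st.2.1 = false then (if st.1 then "escalated" else "done")
    else if st.2.2 || st.1 then "blocked" else "in_progress"

-- ===== PRECONDITION & SPEC =====
-- Pre_ excludes artifacts missing the "status" key: A raises KeyError there (except when an
-- earlier artifact short-circuits an any()); B's loop always raises KeyError there.
def Pre_overall_artifact_status_py (artifacts : List (List (String × String))) : Prop :=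
  ∀ a ∈ artifacts, "status" ∈ a.map Prod.fst
instance (artifacts : List (List (String × String))) : Decidable (Pre_overall_artifact_status_py artifacts) := by unfold Pre_overall_artifact_status_py; infer_instance
def pvWitness_overall_artifact_status_py : (List (List (String × String))) :=
  ([[("status", "done")], [("status", "escalated")]])
def Spec_overall_artifact_status_py (artifacts : List (List (String × String))) (out : String) : Prop := out = overall_artifact_status_py_alt artifacts
instance (artifacts : List (List (String × String))) (out : String) : Decidable (Spec_overall_artifact_status_py artifacts out) := by unfold Spec_overall_artifact_status_py; infer_instance

-- ===== CLAIM =====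
def Claim_equal_overall_artifact_status_py : Prop := ∀ (artifacts : List (List (String × String))), Dom_overall_artifact_status_py artifacts → Pre_overall_artifact_status_py artifacts → Spec_overall_artifact_status_py artifacts (overall_artifact_status_py artifacts)

-- ===== LEMMAS AND PROOFS =====
-- The fold computes exactly (any escalated, not all closed, any blocked/unknown), or-ed onto the accumulator.
lemma foldl_pvStep (l : List (List (String × String))) (acc : Bool × Bool × Bool) :
    l.foldl pvStep acc =
      (acc.1 || l.any (fun a => pvStatus a = "escalated"),
       acc.2.1 || !(l.all (fun a => pvStatus a = "done" || pvStatus a = "escalated")),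
       acc.2.2 || l.any (fun a => pvStatus a = "blocked" || pvStatus a = "unknown")) := by
  induction l generalizing acc with
  | nil => simp
  | cons a t ih =>
    simp only [List.foldl_cons, List.any_cons, List.all_cons, ih]
    unfold pvStep
    by_cases h1 : pvStatus a = "escalated"
    · simp [h1]
    · by_cases h2 : pvStatus a = "done"
      · simp [h2]
      · simp only [h1, h2, ite_true, ne_eq, not_false_iff, if_neg]
        simp [Bool.or_assoc, Bool.or_comm]

lemma any_or_split (l : List (List (String × String))) :
    l.any (fun a => pvStatus a = "blocked" || pvStatus a = "unknown" || pvStatus a = "escalated")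
      = (l.any (fun a => pvStatus a = "blocked" || pvStatus a = "unknown")
          || l.any (fun a => pvStatus a = "escalated")) := by
  rw [Bool.eq_iff_iff]
  simp only [Bool.or_eq_true, List.any_eq_true, decide_eq_true_eq]
  constructor
  · rintro ⟨a, ha, hv⟩; rcases hv with (h | h) | h
    · exact Or.inl ⟨a, ha, Or.inl h⟩
    · exact Or.inl ⟨a, ha, Or.inr h⟩
    · exact Or.inr ⟨a, ha, h⟩
  · rintro (⟨a, ha, hv⟩ | ⟨a, ha, hv⟩)
    · exact ⟨a, ha, by tauto⟩
    · exact ⟨a, ha, by tauto⟩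

-- ===== VERDICT =====
theorem overall_artifact_status_py_spec : Claim_equal_overall_artifact_status_py := by
  intro artifacts _ _
  unfold Spec_overall_artifact_status_py overall_artifact_status_py overall_artifact_status_py_alt
  by_cases hnil : artifacts = []
  · simp [hnil]
  · simp only [hnil, if_neg, not_false_iff, foldl_pvStep, Bool.false_or]
    by_cases hall : artifacts.all (fun a => pvStatus a = "done" || pvStatus a = "escalated") = true
    · simp [hall, Bool.not_true]
    · rw [Bool.eq_false_iff.mpr hall]
      rw [any_or_split]
      simp
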